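-- pv_equiv track=rewrite | github.com/yubo1217/small_c | lexer.py | preprocess
-- ===== SOURCE A (Python) =====
-- def preprocess(source: str, defines: dict = None) -> str:
--     """
--     對原始碼進行簡易的前處理，支援無參數的 #define 巨集展開。
--
--     處理步驟：
--       1. 逐行掃描，找出所有 `#define NAME VALUE` 定義並記錄在字典中。
--       2. 移除含有 #define 的行。
--       3. 以手工分詞的方式逐字元掃描剩餘原始碼，將完整匹配的識別字
--          替換為對應的巨集值，避免誤觸其他識別字中的子字串。
--
--     Args:
--         source  (str):        完整的原始碼字串。
--         defines (dict | None): 跨呼叫共享的巨集字典（互動模式用）；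
--                                傳入 None 時建立本地字典（批次模式）。
--
--     Returns:
--         str: 展開巨集後的原始碼字串。
--
--     Note:
--         不支援帶參數的函式型巨集（例如 `#define MAX(a,b) ...`）。
--         替換採用識別字邊界比對：只有獨立出現的完整識別字才會被替換，
--         不會誤觸包含在其他識別字中的子字串（例如 #define N 8 不會
--         影響 count、int 等含有字母 n 的識別字）。
--     """
--     if defines is None:
--         defines = {}
--     lines = []
--
--     for line in source.split('\n'):
--         stripped = line.strip()
--         if stripped.startswith('#define'):
--             # 移除行尾的單行註解（// ...），避免 len(parts) > 3 而被靜默忽略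
--             comment_idx = stripped.find('//')
--             if comment_idx != -1:
--                 stripped = stripped[:comment_idx].strip()
--             parts = stripped.split()
--             if len(parts) == 3:
--                 defines[parts[1]] = parts[2]   # 記錄巨集名稱 → 取代值
--             lines.append('')   # 保留空行，維持後續 Token 的行號與 buffer 一致
--         else:
--             lines.append(line)
--
--     result = '\n'.join(lines)
--
--     if not defines:
--         return result
--
--     # 逐字元掃描，以手工分詞方式展開巨集。重複最多 10 次直到結果穩定，
--     # 以支援 #define A B / #define B 100 這類鏈式巨集展開。
--     for _ in range(10):
--         out = []
--         i = 0
--         in_str = False    # 是否在雙引號字串內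
--         in_char = False   # 是否在單引號字元字面量內
--         while i < len(result):
--             c = result[i]
--             if c == '\\' and (in_str or in_char):
--                 # 跳脫序列：原樣輸出兩個字元，不改變引號狀態
--                 out.append(c)
--                 i += 1
--                 if i < len(result):
--                     out.append(result[i])
--                     i += 1
--             elif c == '"' and not in_char:
--                 in_str = not in_str
--                 out.append(c)
--                 i += 1
--             elif c == "'" and not in_str:
--                 in_char = not in_char
--                 out.append(c)
--                 i += 1
--             elif (c.isalpha() or c == '_') and not in_str and not in_char:
--                 # 識別字：僅在字串／字元字面量外才做巨集替換
--                 j = i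
--                 while j < len(result) and (result[j].isalnum() or result[j] == '_'):
--                     j += 1
--                 word = result[i:j]
--                 out.append(defines.get(word, word))  # 有對應巨集則替換，否則原樣保留
--                 i = j
--             else:
--                 out.append(c)
--                 i += 1
--         new_result = ''.join(out)
--         if new_result == result:
--             break
--         result = new_result
--
--     return result
-- ===== SOURCE B (Python) =====
-- def _parse_define(stripped):
--     """Given a stripped line starting with '#define', return (name, value) or None."""
--     idx = stripped.find('//')
--     if idx != -1:
--         stripped = stripped[:idx].strip()
--     parts = stripped.split()
--     if len(parts) == 3:
--         return (parts[1], parts[2])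
--     return None
--
--
-- def _tokenize(text):
--     """Split text into tokens: ('id', word) for identifiers outside quoted
--     literals, ('raw', s) for quoted literals (consumed wholesale, escape pairs
--     skipped, unterminated literals run to end of text) and single other chars."""
--     toks = []
--     i, n = 0, len(text)
--     while i < n:
--         c = text[i]
--         if c == '"' or c == "'":
--             j = i + 1
--             while j < n and text[j] != c:
--                 j += 2 if text[j] == '\\' else 1
--             j = min(j + 1, n)
--             toks.append(('raw', text[i:j]))
--             i = j
--         elif c.isalpha() or c == '_':
--             j = i + 1
--             while j < n and (text[j].isalnum() or text[j] == '_'):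
--                 j += 1
--             toks.append(('id', text[i:j]))
--             i = j
--         else:
--             toks.append(('raw', c))
--             i += 1
--     return toks
--
--
-- def _expand(text, defines):
--     """One substitution pass: replace identifier tokens through defines."""
--     return ''.join(defines.get(t, t) if k == 'id' else t for k, t in _tokenize(text))
--
--
-- def preprocess(source: str, defines: dict = None) -> str:
--     if defines is None:
--         defines = {}
--     out_lines = []
--     for line in source.split('\n'):
--         stripped = line.strip()
--         if stripped.startswith('#define'):
--             d = _parse_define(stripped)
--             if d is not None:
--                 defines[d[0]] = d[1]
--             out_lines.append('')
--         else:
--             out_lines.append(line)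
--     result = '\n'.join(out_lines)
--     if not defines:
--         return result
--     for _ in range(10):
--         new_result = _expand(result, defines)
--         if new_result == result:
--             break
--         result = new_result
--     return result
-- ===== Notes on version B (the rewrite author's own statement) =====
-- stated objective: alternative
-- what changed: B replaces A's character-by-character scan with in_str/in_char boolean quote-state flags by a two-phase pass: a tokenizer that consumes whole quoted literals, identifiers and single characters as tokens, then a join that substitutes only identifier tokens through the defines dict; the define-collection phase and the up-to-10-pass fixed-point loop are kept.
import Mathlib
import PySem

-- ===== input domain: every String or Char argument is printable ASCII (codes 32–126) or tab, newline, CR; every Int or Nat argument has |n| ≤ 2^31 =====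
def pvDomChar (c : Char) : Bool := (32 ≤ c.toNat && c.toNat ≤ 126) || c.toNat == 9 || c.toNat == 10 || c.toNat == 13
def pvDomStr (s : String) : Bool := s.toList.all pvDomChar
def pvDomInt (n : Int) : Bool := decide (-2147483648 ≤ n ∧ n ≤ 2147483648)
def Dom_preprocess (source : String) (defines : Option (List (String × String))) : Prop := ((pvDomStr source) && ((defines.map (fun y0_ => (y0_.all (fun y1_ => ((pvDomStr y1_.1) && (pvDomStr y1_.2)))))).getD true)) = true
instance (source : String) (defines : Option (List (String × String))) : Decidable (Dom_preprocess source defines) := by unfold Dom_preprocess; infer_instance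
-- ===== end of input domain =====

-- B replaces A's character-by-character quote-state machine with a two-phase
-- tokenize-then-substitute pass (alternative decomposition, same cost); the
-- proved equivalence is about the RETURN value (both Pythons also write the
-- found macros into a caller-supplied `defines` dict in the same way).

-- ===== PORT A =====
-- inner `while j < len(result) and (result[j].isalnum() or result[j] == '_')` loop of A
def scanIdentA : List Char → List Char × List Char
  | [] => ([], [])
  | c :: rest =>
    if PySem.Chars.isalnum c || c == '_' then
      (c :: (scanIdentA rest).1, (scanIdentA rest).2)
    else ([], c :: rest)

lemma scanIdentA_len (cs : List Char) : (scanIdentA cs).2.length ≤ cs.length := by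
  induction cs with
  | nil => simp [scanIdentA]
  | cons c rest ih =>
    by_cases h : (PySem.Chars.isalnum c || c == '_') = true <;>
      simp [scanIdentA, h] <;> omega

-- A's `while i < len(result)` scan with the in_str/in_char quote state
def aPass (ds : PySem.Dict String String) : List Char → Bool → Bool → List Char
  | [], _, _ => []
  | c :: rest, instr, inchar =>
    if c == '\\' && (instr || inchar) then
      match rest with
      | [] => [c]
      | d :: rest' => c :: d :: aPass ds rest' instr inchar
    else if c == '"' && !inchar then
      c :: aPass ds rest (!instr) inchar
    else if c == '\'' && !instr then
      c :: aPass ds rest instr (!inchar)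
    else if (PySem.Chars.isalpha c || c == '_') && !instr && !inchar then
      let word := String.ofList (c :: (scanIdentA rest).1)
      (PySem.Dict.getD ds word word).toList ++ aPass ds (scanIdentA rest).2 instr inchar
    else
      c :: aPass ds rest instr inchar
  termination_by cs _ _ => cs.length
  decreasing_by
    all_goals (simp; try omega)
    all_goals exact scanIdentA_len rest

-- A's `for _ in range(10)` fixed-point loop
def aFix (ds : PySem.Dict String String) (res : String) : Nat → String
  | 0 => res
  | n + 1 =>
    let nr := String.ofList (aPass ds res.toList false false)
    if nr == res then res else aFix ds nr n

-- body of A's first `for line in source.split('\n')` loop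
def aStep (acc : List String × PySem.Dict String String) (line : String) :
    List String × PySem.Dict String String :=
  let stripped := PySem.Str.strip line
  if PySem.Str.startswith stripped "#define" then
    let commentIdx := PySem.Str.find stripped "//"
    let stripped :=
      if commentIdx != -1 then PySem.Str.strip (PySem.Str.slice stripped none (some commentIdx))
      else stripped
    let parts := PySem.Str.split₀ stripped
    if parts.length == 3 then
      (acc.1 ++ [""], PySem.Dict.insert acc.2 parts[1]! parts[2]!)
    else (acc.1 ++ [""], acc.2)
  else (acc.1 ++ [line], acc.2)

def preprocess (source : String) (defines : Option (List (String × String))) : String :=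
  let ds : PySem.Dict String String := PySem.Dict.ofList (defines.getD [])
  let acc := ((PySem.Str.split? source "\n").getD []).foldl aStep ([], ds)
  let result := PySem.Str.join "\n" acc.1
  if acc.2.items.isEmpty then result else aFix acc.2 result 10

-- ===== PORT B =====
-- B's literal scanner: after an opening quote q, consume up to and including the
-- matching unescaped q (escape pairs skipped; an unterminated literal runs to the end)
def scanLitB (q : Char) : List Char → List Char × List Char
  | [] => ([], [])
  | c :: rest =>
    if c == q then ([c], rest)
    else if c == '\\' then
      match rest with
      | [] => ([c], [])
      | d :: rest' => (c :: d :: (scanLitB q rest').1, (scanLitB q rest').2)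
    else (c :: (scanLitB q rest).1, (scanLitB q rest).2)

def scanIdentB : List Char → List Char × List Char
  | [] => ([], [])
  | c :: rest =>
    if PySem.Chars.isalnum c || c == '_' then
      (c :: (scanIdentB rest).1, (scanIdentB rest).2)
    else ([], c :: rest)

lemma scanLitB_len_fuel (q : Char) : ∀ (n : Nat) (cs : List Char), cs.length ≤ n → (scanLitB q cs).2.length ≤ cs.length := by
  intro n
  induction n with
  | zero =>
    intro cs h
    cases cs with
    | nil => simp [scanLitB.eq_def]
    | cons c rest => simp at h
  | succ m ih =>
    intro cs h
    cases cs with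
    | nil => simp [scanLitB.eq_def]
    | cons c rest =>
      by_cases h1 : c = q
      · rw [scanLitB.eq_def]; simp [h1]
      · by_cases h2 : c = '\\'
        · subst h2
          cases rest with
          | nil => rw [scanLitB.eq_def]; simp [h1]
          | cons d rest' =>
            have := ih rest' (by simp at h; omega)
            rw [scanLitB.eq_def]; simp [h1]
            omega
        · have := ih rest (by simp at h; omega)
          rw [scanLitB.eq_def]; simp [h1, h2]
          omega

lemma scanLitB_len (q : Char) (cs : List Char) : (scanLitB q cs).2.length ≤ cs.length :=
  scanLitB_len_fuel q cs.length cs le_rfl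

lemma scanIdentB_len (cs : List Char) : (scanIdentB cs).2.length ≤ cs.length := by
  induction cs with
  | nil => simp [scanIdentB]
  | cons c rest ih =>
    by_cases h : (PySem.Chars.isalnum c || c == '_') = true <;>
      simp [scanIdentB, h] <;> omega

-- B's `_tokenize`: (isIdentifier?, token text) pairs
def tokenizeB : List Char → List (Bool × List Char)
  | [] => []
  | c :: rest =>
    if c == '"' || c == '\'' then
      (false, c :: (scanLitB c rest).1) :: tokenizeB (scanLitB c rest).2
    else if PySem.Chars.isalpha c || c == '_' then
      (true, c :: (scanIdentB rest).1) :: tokenizeB (scanIdentB rest).2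
    else
      (false, [c]) :: tokenizeB rest
  termination_by cs => cs.length
  decreasing_by
    · have := scanLitB_len c rest; simp; omega
    · have := scanIdentB_len rest; simp; omega
    · simp

-- B's `_expand`: join, substituting identifier tokens through the defines dict
def renderB (ds : PySem.Dict String String) (toks : List (Bool × List Char)) : List Char :=
  (toks.map (fun t =>
    if t.1 then (PySem.Dict.getD ds (String.ofList t.2) (String.ofList t.2)).toList
    else t.2)).flatten

def expandB (ds : PySem.Dict String String) (text : List Char) : List Char :=
  renderB ds (tokenizeB text)

-- B's `_parse_define` helper
def parseDefineB (s : String) : Option (String × String) :=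
  let idx := PySem.Str.find s "//"
  let s := if idx != -1 then PySem.Str.strip (PySem.Str.slice s none (some idx)) else s
  let parts := PySem.Str.split₀ s
  if parts.length == 3 then some (parts[1]!, parts[2]!) else none

-- body of B's first loop
def bStep (acc : List String × PySem.Dict String String) (line : String) :
    List String × PySem.Dict String String :=
  let s := PySem.Str.strip line
  if PySem.Str.startswith s "#define" then
    match parseDefineB s with
    | some nv => (acc.1 ++ [""], PySem.Dict.insert acc.2 nv.1 nv.2)
    | none => (acc.1 ++ [""], acc.2)
  else (acc.1 ++ [line], acc.2)

-- B's `for _ in range(10)` fixed-point loop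
def bFix (ds : PySem.Dict String String) (res : String) : Nat → String
  | 0 => res
  | n + 1 =>
    let nr := String.ofList (expandB ds res.toList)
    if nr == res then res else bFix ds nr n

def preprocess_alt (source : String) (defines : Option (List (String × String))) : String :=
  let ds : PySem.Dict String String := PySem.Dict.ofList (defines.getD [])
  let acc := ((PySem.Str.split? source "\n").getD []).foldl bStep ([], ds)
  let result := PySem.Str.join "\n" acc.1
  if acc.2.items.isEmpty then result else bFix acc.2 result 10

-- ===== PRECONDITION & SPEC =====
def Spec_preprocess (source : String) (defines : Option (List (String × String))) (out : String) : Prop := out = preprocess_alt source defines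
instance (source : String) (defines : Option (List (String × String))) (out : String) : Decidable (Spec_preprocess source defines out) := by unfold Spec_preprocess; infer_instance

-- ===== CLAIM (what is proved, stated in full; the proofs are below) =====
def Claim_equal_preprocess : Prop := ∀ (source : String) (defines : Option (List (String × String))), Dom_preprocess source defines → Spec_preprocess source defines (preprocess source defines)

-- ===== LEMMAS AND PROOFS =====
lemma scanIdent_eq (cs : List Char) : scanIdentB cs = scanIdentA cs := by
  induction cs with
  | nil => rfl
  | cons c rest ih => simp [scanIdentA, scanIdentB, ih]

lemma step_eq : aStep = bStep := by
  funext acc line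
  unfold aStep bStep parseDefineB
  dsimp only
  generalize PySem.Str.strip line = st
  generalize PySem.Str.startswith st "#define" = b0
  cases b0
  · simp
  · generalize PySem.Str.find st "//" = idx
    generalize PySem.Str.strip (PySem.Str.slice st none (some idx)) = st2
    generalize (if (idx != -1) = true then st2 else st) = st3
    generalize PySem.Str.split₀ st3 = ps
    generalize (ps.length == 3) = b1
    cases b1 <;> simp

-- A's scan in the in-string / in-char state consumes exactly B's literal token
lemma aPass_lit (ds : PySem.Dict String String) (q : Char) (hq : q = '"' ∨ q = '\'') :
    ∀ n cs, cs.length ≤ n →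
      aPass ds cs (q == '"') (q == '\'') =
        (scanLitB q cs).1 ++ aPass ds (scanLitB q cs).2 false false := by
  intro n
  induction n with
  | zero =>
    intro cs h
    cases cs with
    | nil => rcases hq with rfl | rfl <;> simp [aPass, scanLitB]
    | cons c rest => simp at h
  | succ m ih =>
    intro cs h
    cases cs with
    | nil => rcases hq with rfl | rfl <;> simp [aPass, scanLitB]
    | cons c rest =>
      by_cases hb : c = '\\'
      · subst hb
        rcases hq with rfl | rfl <;>
        · cases rest with
          | nil =>
            rw [aPass.eq_def, scanLitB.eq_def]
            simp [aPass]
          | cons d rest' =>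
            have hlen : rest'.length ≤ m := by simp at h; omega
            rw [aPass.eq_def, scanLitB.eq_def]
            simp
            exact ih rest' hlen
      · by_cases hc : c = q
        · subst hc
          rcases hq with rfl | rfl <;>
          · rw [aPass.eq_def, scanLitB.eq_def]
            simp
        · have hlen : rest.length ≤ m := by simp at h; omega
          rcases hq with rfl | rfl <;>
          · rw [aPass.eq_def, scanLitB.eq_def]
            simp [hb, hc]
            exact ih rest hlen

lemma pass_eq (ds : PySem.Dict String String) :
    ∀ n cs, cs.length ≤ n → aPass ds cs false false = expandB ds cs := by
  intro n
  induction n with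
  | zero =>
    intro cs h
    cases cs with
    | nil => simp [aPass, expandB, tokenizeB, renderB]
    | cons c rest => simp at h
  | succ m ih =>
    intro cs h
    cases cs with
    | nil => simp [aPass, expandB, tokenizeB, renderB]
    | cons c rest =>
      by_cases hq1 : c = '"'
      · subst hq1
        have hlit : aPass ds rest true false =
            (scanLitB '"' rest).1 ++ aPass ds (scanLitB '"' rest).2 false false :=
          aPass_lit ds '"' (Or.inl rfl) rest.length rest le_rfl
        have hlen : (scanLitB '"' rest).2.length ≤ m := by
          have := scanLitB_len '"' rest; simp at h; omega
        rw [aPass.eq_def, expandB, tokenizeB.eq_def]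
        simp only [renderB, List.map_cons, List.flatten_cons]
        simp [hlit, ih _ hlen, expandB, renderB]
      · by_cases hq2 : c = '\''
        · subst hq2
          have hlit : aPass ds rest false true =
              (scanLitB '\'' rest).1 ++ aPass ds (scanLitB '\'' rest).2 false false :=
            aPass_lit ds '\'' (Or.inr rfl) rest.length rest le_rfl
          have hlen : (scanLitB '\'' rest).2.length ≤ m := by
            have := scanLitB_len '\'' rest; simp at h; omega
          rw [aPass.eq_def, expandB, tokenizeB.eq_def]
          simp only [renderB, List.map_cons, List.flatten_cons]
          simp [hlit, ih _ hlen, expandB, renderB]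
        · by_cases hid : (PySem.Chars.isalpha c || c == '_') = true
          · have hlen : (scanIdentA rest).2.length ≤ m := by
              have := scanIdentA_len rest; simp at h; omega
            rw [aPass.eq_def, expandB, tokenizeB.eq_def]
            simp only [renderB, List.map_cons, List.flatten_cons]
            simp [hq1, hq2, hid, scanIdent_eq, ih _ hlen, expandB, renderB]
          · have hlen : rest.length ≤ m := by simp at h; omega
            rw [aPass.eq_def, expandB, tokenizeB.eq_def]
            simp only [renderB, List.map_cons, List.flatten_cons]
            simp [hq1, hq2, hid, ih _ hlen, expandB, renderB]

lemma fix_eq (ds : PySem.Dict String String) (n : Nat) (res : String) :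
    aFix ds res n = bFix ds res n := by
  induction n generalizing res with
  | zero => rfl
  | succ m ih =>
    simp only [aFix, bFix, pass_eq ds res.toList.length res.toList le_rfl]
    split
    · rfl
    · exact ih _

-- ===== VERDICT (by name: the statement is the Claim_ definition above) =====
theorem preprocess_spec : Claim_equal_preprocess := by
  intro source defines _
  unfold Spec_preprocess preprocess preprocess_alt
  rw [step_eq]
  dsimp only
  exact if_congr Iff.rfl rfl (fix_eq _ _ _)
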